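-- pv_equiv track=rewrite | github.com/Lavesh481/MediTriage---the-healthcare-revelutionary | BACKEND/utils.py | encode_symptoms
-- ===== SOURCE A (Python) =====
-- def encode_symptoms(user_symptoms, symptom_list):
--     """
--     Converts symptom list into ML input vector
--     perfroms mapping from frontend terms to dataset terms
--     """
--     # Mapping from frontend symtoms to dataset features
--     mapping = {
--         "fever": "high_fever",
--         "shortness_of_breath": "breathlessness",
--         "sore_throat": "throat_irritation",
--         "runny_nose": "runny_nose",
--         "headache": "headache",
--         "cough": "cough",
--         "chest_pain": "chest_pain",
--         "fatigue": "fatigue",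
--         "nausea": "nausea"
--     }
--
--     # Map symptoms
--     mapped_symptoms = [mapping.get(s, s) for s in user_symptoms]
--
--     return [
--         1 if symptom in mapped_symptoms else 0
--         for symptom in symptom_list
--     ]
-- ===== SOURCE B (Python) =====
-- def encode_symptoms(user_symptoms, symptom_list):
--     mapping = {
--         "fever": "high_fever",
--         "shortness_of_breath": "breathlessness",
--         "sore_throat": "throat_irritation",
--         "runny_nose": "runny_nose",
--         "headache": "headache",
--         "cough": "cough",
--         "chest_pain": "chest_pain",
--         "fatigue": "fatigue",
--         "nausea": "nausea"
--     }
--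
--     # Index table: each dataset name -> list of ALL its positions in symptom_list
--     index = {}
--     for i, name in enumerate(symptom_list):
--         index.setdefault(name, []).append(i)
--
--     # Scatter 1s into a preallocated zero vector
--     result = [0] * len(symptom_list)
--     for s in user_symptoms:
--         for j in index.get(mapping.get(s, s), []):
--             result[j] = 1
--     return result
-- ===== Notes on version B (the rewrite author's own statement) =====
-- stated objective: faster
-- what changed: Instead of mapping the user symptoms and testing list membership once per symptom_list slot, B builds a name-to-positions index of symptom_list once and scatters 1s into a preallocated zero vector while looping over the user symptoms.
import Mathlib
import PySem

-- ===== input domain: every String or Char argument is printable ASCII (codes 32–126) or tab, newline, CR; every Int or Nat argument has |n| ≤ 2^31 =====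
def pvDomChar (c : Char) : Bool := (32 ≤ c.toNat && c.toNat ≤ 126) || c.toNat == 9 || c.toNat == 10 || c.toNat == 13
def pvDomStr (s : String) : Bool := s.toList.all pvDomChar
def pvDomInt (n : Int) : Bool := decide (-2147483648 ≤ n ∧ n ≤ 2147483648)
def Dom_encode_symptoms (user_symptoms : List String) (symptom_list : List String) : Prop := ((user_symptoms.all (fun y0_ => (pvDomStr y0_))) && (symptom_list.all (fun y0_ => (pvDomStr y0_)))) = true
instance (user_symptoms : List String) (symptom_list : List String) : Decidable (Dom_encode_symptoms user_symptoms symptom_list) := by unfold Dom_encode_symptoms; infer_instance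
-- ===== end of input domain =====

-- B replaces A's per-output-slot membership scan with a position-index table over
-- symptom_list and a scatter of 1s into a preallocated zero vector (objective: faster; measured).

-- ===== PORT A =====
-- the mapping dict literal (shared by both Pythons)
def pvMapping : PySem.Dict String String := PySem.Dict.ofList
  [("fever", "high_fever"), ("shortness_of_breath", "breathlessness"),
   ("sore_throat", "throat_irritation"), ("runny_nose", "runny_nose"),
   ("headache", "headache"), ("cough", "cough"), ("chest_pain", "chest_pain"),
   ("fatigue", "fatigue"), ("nausea", "nausea")]

def encode_symptoms (user_symptoms : List String) (symptom_list : List String) : List Int :=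
  let mapped_symptoms := user_symptoms.map (fun s => pvMapping.getD s s)
  symptom_list.map (fun symptom => if symptom ∈ mapped_symptoms then (1 : Int) else 0)

-- ===== PORT B =====
-- index = {}; for i, name in enumerate(symptom_list): index.setdefault(name, []).append(i)
def pvBuildIndex (symptom_list : List String) : PySem.Dict String (List Int) :=
  (PySem.List.enumerate symptom_list 0).foldl
    (fun d p => d.insert p.2 ((d.getD p.2 []) ++ [p.1])) (PySem.Dict.ofList [])

-- for j in ps: result[j] = 1
def pvScatter (r : List Int) (ps : List Int) : List Int :=
  ps.foldl (fun r j => PySem.List.pySetD r j 1) r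

def encode_symptoms_alt (user_symptoms : List String) (symptom_list : List String) : List Int :=
  let index := pvBuildIndex symptom_list
  user_symptoms.foldl
    (fun result s => pvScatter result (index.getD (pvMapping.getD s s) []))
    (List.replicate symptom_list.length 0)

-- ===== PRECONDITION & SPEC =====
def Spec_encode_symptoms (user_symptoms : List String) (symptom_list : List String) (out : List Int) : Prop := out = encode_symptoms_alt user_symptoms symptom_list
instance (user_symptoms : List String) (symptom_list : List String) (out : List Int) : Decidable (Spec_encode_symptoms user_symptoms symptom_list out) := by unfold Spec_encode_symptoms; infer_instance

-- ===== CLAIM (what is proved, stated in full; the proofs are below) =====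
def Claim_equal_encode_symptoms : Prop := ∀ (user_symptoms : List String) (symptom_list : List String), Dom_encode_symptoms user_symptoms symptom_list → Spec_encode_symptoms user_symptoms symptom_list (encode_symptoms user_symptoms symptom_list)

-- ===== LEMMAS AND PROOFS =====

-- indicator used to characterise both programs
def pvInd (M : List String) (sym : String) : Int := if sym ∈ M then 1 else 0

-- positions of m in an enumerated list, in order
def pvPositions (l : List (Int × String)) (m : String) : List Int :=
  (l.filter (fun p => p.2 == m)).map (·.1)

theorem pvBuildIndex_foldl_getD (l : List (Int × String)) (d : PySem.Dict String (List Int)) (m : String) :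
    (l.foldl (fun d p => d.insert p.2 ((d.getD p.2 []) ++ [p.1])) d).getD m []
      = d.getD m [] ++ pvPositions l m := by
  induction l generalizing d with
  | nil => simp [pvPositions]
  | cons p l ih =>
    simp only [List.foldl_cons, ih]
    by_cases h : p.2 = m
    · subst h
      simp [pvPositions, PySem.Dict.getD_insert_self]
    · simp [pvPositions, PySem.Dict.getD_insert_of_ne, h, Ne.symm h]

theorem pvBuildIndex_getD (sl : List String) (m : String) :
    (pvBuildIndex sl).getD m [] = pvPositions (PySem.List.enumerate sl 0) m := by
  simpa using pvBuildIndex_foldl_getD (PySem.List.enumerate sl 0) (PySem.Dict.ofList []) m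

theorem mem_pvPositions_enumerate (sl : List String) (m : String) (j : Int) :
    j ∈ pvPositions (PySem.List.enumerate sl 0) m
      ↔ ∃ (k : Nat) (h : k < sl.length), j = (k : Int) ∧ sl[k] = m := by
  simp only [pvPositions, List.mem_map, List.mem_filter, PySem.List.mem_enumerate_iff]
  constructor
  · rintro ⟨p, ⟨⟨k, hk, rfl⟩, hm⟩, rfl⟩
    exact ⟨k, hk, by simp, by simpa using hm⟩
  · rintro ⟨k, hk, rfl, hm⟩
    exact ⟨((k : Int), sl[k]), ⟨⟨k, hk, by simp⟩, by simpa using hm⟩, rfl⟩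

theorem pvPositions_range (sl : List String) (m : String) (j : Int)
    (hj : j ∈ pvPositions (PySem.List.enumerate sl 0) m) :
    0 ≤ j ∧ j < (sl.length : Int) := by
  obtain ⟨k, hk, rfl, -⟩ := (mem_pvPositions_enumerate sl m j).mp hj
  exact ⟨Int.natCast_nonneg k, by exact_mod_cast hk⟩

theorem pvScatter_getElem? (ps : List Int) (r : List Int)
    (hps : ∀ j ∈ ps, 0 ≤ j ∧ j < (r.length : Int)) (k : Nat) :
    (pvScatter r ps)[k]? = if (k : Int) ∈ ps then some 1 else r[k]? := by
  induction ps generalizing r with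
  | nil => simp [pvScatter]
  | cons j ps ih =>
    have hj := hps j (List.mem_cons_self)
    have hset : PySem.List.pySetD r j 1 = r.set j.toNat 1 :=
      PySem.List.pySetD_of_nonneg r 1 hj.1
    have hstep : pvScatter r (j :: ps) = pvScatter (r.set j.toNat 1) ps := by
      simp [pvScatter, hset]
    rw [hstep, ih]
    · by_cases hk : (k : Int) ∈ ps
      · simp [hk]
      · by_cases hkj : (k : Int) = j
        · have hkn : j.toNat = k := by omega
          have hklen : k < r.length := by omega
          simp [hkj, hkn, hklen]
        · have hkn : j.toNat ≠ k := by omega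
          simp [hk, hkj, hkn]
    · intro i hi
      have := hps i (List.mem_cons_of_mem _ hi)
      simpa using this

-- one user symptom's scatter step on an indicator vector
theorem pvScatter_step (sl : List String) (M : List String) (m : String) :
    pvScatter (sl.map (pvInd M)) ((pvBuildIndex sl).getD m [])
      = sl.map (pvInd (m :: M)) := by
  rw [pvBuildIndex_getD]
  apply List.ext_getElem?
  intro k
  rw [pvScatter_getElem?]
  · by_cases hk : k < sl.length
    · have h1 : (sl.map (pvInd M))[k]? = some (pvInd M sl[k]) := by simp [hk]
      have h2 : (sl.map (pvInd (m :: M)))[k]? = some (pvInd (m :: M) sl[k]) := by simp [hk]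
      rw [h1, h2]
      by_cases hmem : (k : Int) ∈ pvPositions (PySem.List.enumerate sl 0) m
      · obtain ⟨k', hk', hkk, hsl⟩ := (mem_pvPositions_enumerate sl m _).mp hmem
        have : k' = k := by omega
        subst this
        simp [hmem, pvInd, hsl]
      · have hne : sl[k] ≠ m := by
          intro h
          exact hmem ((mem_pvPositions_enumerate sl m _).mpr ⟨k, hk, rfl, h⟩)
        simp [hmem, pvInd, hne]
    · have hnm : ¬ ((k : Int) ∈ pvPositions (PySem.List.enumerate sl 0) m) := by
        intro h
        have := pvPositions_range sl m _ h
        omega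
      simp [hnm, List.getElem?_eq_none (by simpa using Nat.le_of_not_lt hk)]
  · intro j hj
    have := pvPositions_range sl m j hj
    simpa using this

theorem pvInd_congr (sl : List String) (M M' : List String)
    (h : ∀ s, s ∈ M ↔ s ∈ M') : sl.map (pvInd M) = sl.map (pvInd M') := by
  apply List.map_congr_left
  intro s _
  simp [pvInd, h s]

-- the whole user-symptom loop of B on an indicator vector
theorem pvFold_ind (sl : List String) (us : List String) (M : List String) :
    us.foldl (fun result s => pvScatter result ((pvBuildIndex sl).getD (pvMapping.getD s s) []))
        (sl.map (pvInd M))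
      = sl.map (pvInd (M ++ us.map (fun s => pvMapping.getD s s))) := by
  induction us generalizing M with
  | nil => simp
  | cons s us ih =>
    simp only [List.foldl_cons, pvScatter_step, ih]
    apply pvInd_congr
    intro x
    simp [or_left_comm]

-- ===== VERDICT (by name: the statement is the Claim_ definition above) =====
theorem encode_symptoms_spec : Claim_equal_encode_symptoms := by
  intro us sl _
  show _ = encode_symptoms_alt us sl
  have hzero : (List.replicate sl.length (0 : Int)) = sl.map (pvInd []) := by
    have h0 : pvInd [] = fun _ => (0 : Int) := by funext s; simp [pvInd]
    rw [h0]; exact (List.map_const ..).symm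
  rw [encode_symptoms_alt, hzero]
  rw [pvFold_ind sl us []]
  rfl
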